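-- pv_equiv track=rewrite | github.com/jmqd/chess-engine | piece.py | get_horizontal_moves
-- ===== SOURCE A (Python) =====
-- RIGHT = 1
--
-- LEFT = RIGHT * -1
--
-- def get_horizontal_moves(square_index):
--     horizontal_index = square_index % 8
--     left_threshold = horizontal_index
--     right_threshold = 7 - horizontal_index
--
--     possibles = []
--     for i in range(1, left_threshold + 1):
--         move = LEFT * i
--         possibles.append(move)
--
--     for i in range(1, right_threshold + 1):
--         move = RIGHT * i
--         possibles.append(move)
--
--     return set(possibles)
-- ===== SOURCE B (Python) =====
-- def _ray(sign, length):
--     # Offsets sign*1, ..., sign*length, built back-to-front by recursion on length.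
--     if length <= 0:
--         return []
--     return _ray(sign, length - 1) + [sign * length]
--
--
-- def get_horizontal_moves(square_index):
--     h = square_index % 8
--     return set(_ray(-1, h) + _ray(1, 7 - h))
-- ===== Notes on version B (the rewrite author's own statement) =====
-- stated objective: alternative
-- what changed: Replaces A's two explicit accumulation loops over ranges (each multiplying by a LEFT/RIGHT constant) with a single recursive helper _ray(sign, length) that builds one ray of offsets back-to-front by structural recursion on its length, applied once per direction; no loops, ranges or direction constants remain.
import Mathlib
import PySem

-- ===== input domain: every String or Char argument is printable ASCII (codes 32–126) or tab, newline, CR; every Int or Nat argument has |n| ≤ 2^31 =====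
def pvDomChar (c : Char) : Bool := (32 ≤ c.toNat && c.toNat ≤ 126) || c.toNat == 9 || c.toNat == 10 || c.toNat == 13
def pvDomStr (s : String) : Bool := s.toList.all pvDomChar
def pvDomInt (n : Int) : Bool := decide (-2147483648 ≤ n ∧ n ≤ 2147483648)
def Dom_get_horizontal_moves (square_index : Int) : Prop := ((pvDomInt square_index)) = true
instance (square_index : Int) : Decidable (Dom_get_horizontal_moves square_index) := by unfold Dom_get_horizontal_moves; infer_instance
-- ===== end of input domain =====

-- B replaces A's two accumulation loops (with LEFT/RIGHT constants) by one recursive helper that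
-- builds a ray of offsets back-to-front by recursion on its length, used once per direction (objective: alternative).

-- ===== PORT A =====
def get_horizontal_moves (square_index : Int) : List Int :=
  let horizontal_index := PySem.Int.mod square_index 8
  let left_threshold := horizontal_index
  let right_threshold := 7 - horizontal_index
  let possibles : List Int := []
  let possibles := (PySem.List.pyRange 1 (left_threshold + 1) 1).foldl
    (fun acc i => acc ++ [(-1) * i]) possibles
  let possibles := (PySem.List.pyRange 1 (right_threshold + 1) 1).foldl
    (fun acc i => acc ++ [1 * i]) possibles
  PySem.Set.ofList possibles

-- ===== PORT B =====
-- offsets sign*1 … sign*length, built back-to-front by recursion on length (transliterates _ray)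
def pvRay (sign : Int) (length : Int) : List Int :=
  if length ≤ 0 then []
  else pvRay sign (length - 1) ++ [sign * length]
termination_by length.toNat
decreasing_by omega

def get_horizontal_moves_alt (square_index : Int) : List Int :=
  let h := PySem.Int.mod square_index 8
  PySem.Set.ofList (pvRay (-1) h ++ pvRay 1 (7 - h))

-- ===== PRECONDITION & SPEC =====
def Spec_get_horizontal_moves (square_index : Int) (out : List Int) : Prop := out = get_horizontal_moves_alt square_index
instance (square_index : Int) (out : List Int) : Decidable (Spec_get_horizontal_moves square_index out) := by unfold Spec_get_horizontal_moves; infer_instance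

-- ===== CLAIM =====
def Claim_equal_get_horizontal_moves : Prop := ∀ (square_index : Int), Dom_get_horizontal_moves square_index → Spec_get_horizontal_moves square_index (get_horizontal_moves square_index)

-- ===== LEMMAS AND PROOFS =====

-- Both programs depend on the input only through square_index % 8 ∈ [0,8); check the 8 residues.
theorem pvRay_zero (s : Int) : pvRay s 0 = [] := by
  rw [pvRay]; simp

theorem pvRay_succ (s l : Int) (h : 1 ≤ l) : pvRay s l = pvRay s (l - 1) ++ [s * l] := by
  rw [pvRay]; simp [show ¬ l ≤ 0 by omega]

theorem get_horizontal_moves_eq_alt (square_index : Int) :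
    get_horizontal_moves square_index = get_horizontal_moves_alt square_index := by
  unfold get_horizontal_moves get_horizontal_moves_alt
  have h0 : 0 ≤ PySem.Int.mod square_index 8 := PySem.Int.mod_nonneg square_index (by norm_num)
  have h8 : PySem.Int.mod square_index 8 < 8 := PySem.Int.mod_lt square_index (by norm_num)
  generalize PySem.Int.mod square_index 8 = m at h0 h8
  interval_cases m <;> norm_num [pvRay_succ, pvRay_zero] <;> decide

-- ===== VERDICT =====
theorem get_horizontal_moves_spec : Claim_equal_get_horizontal_moves := by
  intro n _
  exact get_horizontal_moves_eq_alt n
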